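-- pv_equiv track=rewrite | github.com/zhenga8533/bbvw2-redux-wiki | src/utils/sprite_utils.py | mkdocs_admonition
-- ===== SOURCE A (Python) =====
-- def mkdocs_admonition(
--     title: str,
--     content: str,
--     admonition_type: str = "note"
-- ) -> str:
--     """
--     Generate a MkDocs admonition block.
--
--     Args:
--         title: Admonition title
--         content: Admonition content
--         admonition_type: Type of admonition (note, tip, warning, danger, etc.)
--
--     Returns:
--         str: Formatted admonition block
--     """
--     lines = [f'!!! {admonition_type} "{title}"']
--     for line in content.split('\n'):
--         lines.append(f'    {line}')
--     return '\n'.join(lines)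
-- ===== SOURCE B (Python) =====
-- def mkdocs_admonition(
--     title: str,
--     content: str,
--     admonition_type: str = "note"
-- ) -> str:
--     # Indent the whole content block in one pass instead of split/loop/join.
--     return f'!!! {admonition_type} "{title}"\n    ' + content.replace('\n', '\n    ')
-- ===== Notes on version B (the rewrite author's own statement) =====
-- stated objective: idiomatic
-- what changed: Replaced the split-into-lines / loop-appending / join pipeline with a single string concatenation plus one content.replace('\n', '\n ') pass that indents the whole block at once.
import Mathlib
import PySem

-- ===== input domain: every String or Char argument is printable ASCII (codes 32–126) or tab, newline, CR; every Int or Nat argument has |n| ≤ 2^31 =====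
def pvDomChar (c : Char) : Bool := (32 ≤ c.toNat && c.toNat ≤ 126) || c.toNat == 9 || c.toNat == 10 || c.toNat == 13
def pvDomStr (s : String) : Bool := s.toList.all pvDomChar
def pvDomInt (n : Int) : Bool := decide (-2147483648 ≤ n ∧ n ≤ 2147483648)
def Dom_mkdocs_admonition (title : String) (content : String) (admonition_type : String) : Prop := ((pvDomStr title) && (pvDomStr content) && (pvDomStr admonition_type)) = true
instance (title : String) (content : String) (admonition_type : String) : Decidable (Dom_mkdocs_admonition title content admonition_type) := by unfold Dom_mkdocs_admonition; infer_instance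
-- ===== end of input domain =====

-- B replaces A's split-into-lines / append-loop / join pipeline with one concatenation
-- plus a single replace pass that indents the whole content block at once (idiomatic, same cost).

-- ===== PORT A =====
def mkdocs_admonition (title : String) (content : String) (admonition_type : String) : String :=
  -- lines = [f'!!! {admonition_type} "{title}"']
  let header : String := "!!! " ++ admonition_type ++ " \"" ++ title ++ "\""
  -- for line in content.split('\n'): lines.append(f'    {line}')
  -- (split? is some here since the separator "\n" is nonempty; getD only discharges the option)
  let lines : List String :=
    ((PySem.Str.split? content "\n").getD []).foldl
      (fun acc line => acc ++ ["    " ++ line]) [header]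
  -- return '\n'.join(lines)
  PySem.Str.join "\n" lines

-- ===== PORT B =====
def mkdocs_admonition_alt (title : String) (content : String) (admonition_type : String) : String :=
  "!!! " ++ admonition_type ++ " \"" ++ title ++ "\"" ++ "\n    "
    ++ PySem.Str.replace content "\n" "\n    "

-- ===== PRECONDITION & SPEC =====
def Spec_mkdocs_admonition (title : String) (content : String) (admonition_type : String) (out : String) : Prop := out = mkdocs_admonition_alt title content admonition_type
instance (title : String) (content : String) (admonition_type : String) (out : String) : Decidable (Spec_mkdocs_admonition title content admonition_type out) := by unfold Spec_mkdocs_admonition; infer_instance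

-- ===== CLAIM (what is proved, stated in full; the proofs are below) =====
def Claim_equal_mkdocs_admonition : Prop := ∀ (title : String) (content : String) (admonition_type : String), Dom_mkdocs_admonition title content admonition_type → Spec_mkdocs_admonition title content admonition_type (mkdocs_admonition title content admonition_type)

-- ===== LEMMAS AND PROOFS =====

-- the four-space indent as a character list
def pvInd : List Char := [' ', ' ', ' ', ' ']

-- reference split on '\n': first piece and the remaining pieces
def pvSp : List Char → List Char × List (List Char)
  | [] => ([], [])
  | c :: t => if c = '\n' then ([], (pvSp t).1 :: (pvSp t).2)
              else (c :: (pvSp t).1, (pvSp t).2)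

-- reference result of replacing '\n' by '\n' ++ pvInd
def pvRep : List Char → List Char
  | [] => []
  | c :: t => if c = '\n' then '\n' :: pvInd ++ pvRep t else c :: pvRep t

theorem pvSp_go (l : List Char) : ∀ (f : Nat) (cur : List Char) (acc : List (List Char)),
    l.length ≤ f →
    PySem.Chars.splitOn.go ['\n'] f l cur acc
      = acc.reverse ++ (cur.reverse ++ (pvSp l).1) :: (pvSp l).2 := by
  induction l with
  | nil =>
    intro f cur acc _
    cases f <;> rw [PySem.Chars.splitOn.go] <;> simp [pvSp]
  | cons c t ih =>
    intro f cur acc h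
    cases f with
    | zero => simp at h
    | succ f =>
      rw [PySem.Chars.splitOn.go]
      by_cases hc : c = '\n'
      · subst hc
        simp only [List.isPrefixOf, BEq.rfl, Bool.true_and, if_true,
          List.length_cons, List.length_nil, List.drop_succ_cons, List.drop_zero]
        rw [ih f [] (cur.reverse :: acc) (by simpa using Nat.lt_succ_iff.mp (by simpa using h))]
        simp [pvSp]
      · have hpre : List.isPrefixOf ['\n'] (c :: t) = false := by
          simp [List.isPrefixOf]; exact fun h' => hc h'.symm
        rw [hpre]
        simp only [if_false, Bool.false_eq_true]
        rw [ih f (c :: cur) acc (by simpa using Nat.lt_succ_iff.mp (by simpa using h))]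
        simp [pvSp, hc]

theorem pvRep_go (l : List Char) : ∀ (f : Nat) (acc : List Char),
    l.length ≤ f →
    PySem.Chars.replace.go ['\n'] ('\n' :: pvInd) f l acc = acc.reverse ++ pvRep l := by
  induction l with
  | nil =>
    intro f acc _
    cases f <;> rw [PySem.Chars.replace.go] <;> simp [pvRep]
  | cons c t ih =>
    intro f acc h
    cases f with
    | zero => simp at h
    | succ f =>
      rw [PySem.Chars.replace.go]
      by_cases hc : c = '\n'
      · subst hc
        simp only [List.isPrefixOf, BEq.rfl, Bool.true_and, if_true,
          List.length_cons, List.length_nil, List.drop_succ_cons, List.drop_zero]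
        rw [ih f _ (by simpa using Nat.lt_succ_iff.mp (by simpa using h))]
        simp [pvRep, pvInd]
      · have hpre : List.isPrefixOf ['\n'] (c :: t) = false := by
          simp [List.isPrefixOf]; exact fun h' => hc h'.symm
        rw [hpre]
        simp only [if_false, Bool.false_eq_true]
        rw [ih f (c :: acc) (by simpa using Nat.lt_succ_iff.mp (by simpa using h))]
        simp [pvRep, hc]

theorem pvJoin_sp (l : List Char) : ∀ (pre : List Char),
    PySem.Chars.join ['\n'] ((pre ++ (pvSp l).1) :: (pvSp l).2.map (pvInd ++ ·))
      = pre ++ pvRep l := by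
  induction l with
  | nil => intro pre; simp [pvSp, pvRep, PySem.Chars.join_singleton]
  | cons c t ih =>
    intro pre
    by_cases hc : c = '\n'
    · subst hc
      simp only [pvSp, if_true, List.map_cons]
      rw [PySem.Chars.join_cons_cons, ih pvInd]
      simp [pvRep]
    · simp only [pvSp, hc, if_false]
      have := ih (pre ++ [c])
      simp only [List.append_assoc] at this
      rw [show pre ++ c :: (pvSp t).1 = (pre ++ [c]) ++ (pvSp t).1 by simp, ih (pre ++ [c])]
      simp [pvRep, hc]

theorem pvFoldl_append (ls : List String) : ∀ (init : List String),
    ls.foldl (fun acc line => acc ++ ["    " ++ line]) init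
      = init ++ ls.map (fun line => "    " ++ line) := by
  induction ls with
  | nil => intro init; simp
  | cons x xs ih => intro init; simp [ih]

-- ===== VERDICT (by name: the statement is the Claim_ definition above) =====
theorem mkdocs_admonition_spec : Claim_equal_mkdocs_admonition := by
  intro title content admonition_type _
  unfold Spec_mkdocs_admonition mkdocs_admonition mkdocs_admonition_alt
  dsimp only
  apply String.toList_inj.mp
  rw [pvFoldl_append]
  have hsplit : PySem.Str.split? content "\n"
      = some ((PySem.Chars.splitOn content.toList ['\n']).map String.ofList) := by
    simp [PySem.Str.split?, PySem.Chars.split?]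
  rw [hsplit]
  have hgo : PySem.Chars.splitOn content.toList ['\n']
      = ((pvSp content.toList).1) :: (pvSp content.toList).2 := by
    rw [PySem.Chars.splitOn, pvSp_go content.toList (content.toList.length + 1) [] []
      (Nat.le_succ _)]
    simp
  have hrep : PySem.Chars.replace content.toList ['\n'] ('\n' :: pvInd)
      = pvRep content.toList := by
    rw [PySem.Chars.replace]
    simp only [List.isEmpty_cons, if_false, Bool.false_eq_true]
    exact pvRep_go content.toList content.toList.length [] le_rfl
  have h1 : "\n    ".toList = '\n' :: pvInd := by decide
  have h2 : "\n".toList = ['\n'] := by decide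
  have h3 : "    ".toList = pvInd := by decide
  simp only [Option.getD_some, PySem.Str.join, PySem.Str.replace, hgo, List.singleton_append,
    List.map_cons, List.map_map, String.toList_ofList, String.toList_append, h1, h2, h3, hrep]
  have hmap : String.toList ∘ (fun line => "    " ++ line) ∘ String.ofList
      = fun p : List Char => pvInd ++ p := by
    funext p
    simp [Function.comp, h3]
  rw [hmap]
  rw [PySem.Chars.join_cons_cons, pvJoin_sp content.toList pvInd]
  simp [List.append_assoc]
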